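-- pv_equiv track=rewrite | github.com/liyigenius/myleetgame | py/leetcode/solution87.py | checkOK
-- ===== SOURCE A (Python) =====
-- def checkOK(m1, m2):
--     for i in m1:
--         if m1[i] != m2.get(i, 0):
--             return False
--     for i in m2:
--         if m2[i] != m1.get(i,0):
--             return False
--     return True
-- ===== SOURCE B (Python) =====
-- def checkOK(m1, m2):
--     # Canonicalize each dict to its sorted list of nonzero items and compare.
--     # Correct because with default 0, two count-dicts agree pointwise iff
--     # their sets of nonzero (key, value) pairs coincide.
--     def canon(d):
--         return sorted(((k, v) for k, v in d.items() if v != 0), key=lambda kv: kv[0])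
--     return canon(m1) == canon(m2)
-- ===== Notes on version B (the rewrite author's own statement) =====
-- stated objective: alternative
-- what changed: A's two directional membership scans are replaced by canonicalization: each dict is reduced to its key-sorted list of nonzero items and the two canonical lists are compared for equality.
import Mathlib
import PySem

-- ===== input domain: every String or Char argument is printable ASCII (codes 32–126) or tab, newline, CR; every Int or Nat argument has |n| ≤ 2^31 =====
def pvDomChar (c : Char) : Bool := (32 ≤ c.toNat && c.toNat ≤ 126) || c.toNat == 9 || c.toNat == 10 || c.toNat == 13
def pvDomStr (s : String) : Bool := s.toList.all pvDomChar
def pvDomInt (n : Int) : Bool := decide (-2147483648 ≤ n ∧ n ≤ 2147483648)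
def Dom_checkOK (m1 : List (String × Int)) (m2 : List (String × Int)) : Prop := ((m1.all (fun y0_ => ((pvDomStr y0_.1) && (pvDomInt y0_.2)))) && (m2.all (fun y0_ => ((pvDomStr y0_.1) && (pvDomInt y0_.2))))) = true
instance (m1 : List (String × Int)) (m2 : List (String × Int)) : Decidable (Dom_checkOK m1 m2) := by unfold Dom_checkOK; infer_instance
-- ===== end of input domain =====

-- ===== PORT A =====
-- One line: B canonicalizes each dict to its key-sorted list of nonzero items and compares those (objective: alternative).
def checkOK (m1 : List (String × Int)) (m2 : List (String × Int)) : Bool :=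
  let d1 := PySem.Dict.ofList m1
  let d2 := PySem.Dict.ofList m2
  -- for i in m1: if m1[i] != m2.get(i, 0): return False   (early return = short-circuit all)
  (d1.keys.all fun i => d1.getD i 0 == d2.getD i 0) &&
  -- for i in m2: if m2[i] != m1.get(i,0): return False
  (d2.keys.all fun i => d2.getD i 0 == d1.getD i 0)

-- ===== PORT B =====
-- canon(d) = sorted(((k, v) for k, v in d.items() if v != 0), key=lambda kv: kv[0])
def pvCanon (d : PySem.Dict String Int) : List (String × Int) :=
  PySem.List.sorted (d.items.filter fun kv => kv.2 != 0) (fun kv => kv.1)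

def checkOK_alt (m1 : List (String × Int)) (m2 : List (String × Int)) : Bool :=
  pvCanon (PySem.Dict.ofList m1) == pvCanon (PySem.Dict.ofList m2)

-- ===== PRECONDITION & SPEC =====
def Spec_checkOK (m1 : List (String × Int)) (m2 : List (String × Int)) (out : Bool) : Prop := out = checkOK_alt m1 m2
instance (m1 : List (String × Int)) (m2 : List (String × Int)) (out : Bool) : Decidable (Spec_checkOK m1 m2 out) := by unfold Spec_checkOK; infer_instance

-- ===== CLAIM (what is proved, stated in full; the proofs are below) =====
def Claim_equal_checkOK : Prop := ∀ (m1 : List (String × Int)) (m2 : List (String × Int)), Dom_checkOK m1 m2 → Spec_checkOK m1 m2 (checkOK m1 m2)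

-- ===== LEMMAS AND PROOFS =====

-- getD of a key outside the dict is the default; a nonzero getD 0 therefore names a real item
theorem pv_getD_ne_mem_items (d : PySem.Dict String Int) (hnd : d.keys.Nodup) (k : String)
    (h : d.getD k 0 ≠ 0) : (k, d.getD k 0) ∈ d.items := by
  by_cases hc : d.contains k = true
  · have hk : k ∈ d.keys := (PySem.Dict.contains_iff_mem_keys _ _).mp hc
    simp only [PySem.Dict.keys, List.mem_map] at hk
    obtain ⟨⟨k', v⟩, hmem, hk'⟩ := hk
    cases hk'
    rw [PySem.Dict.getD_of_mem_items d hmem hnd 0]; exact hmem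
  · rw [PySem.Dict.getD_of_not_contains _ _ (by simpa using hc)] at h
    exact absurd rfl h

-- membership in the filtered items list, characterized by getD
theorem pv_mem_filter_iff (d : PySem.Dict String Int) (hnd : d.keys.Nodup) (k : String) (v : Int) :
    (k, v) ∈ d.items.filter (fun kv => kv.2 != 0) ↔ v ≠ 0 ∧ d.getD k 0 = v := by
  simp only [List.mem_filter, bne_iff_ne, ne_eq]
  constructor
  · rintro ⟨hmem, hv⟩
    exact ⟨hv, PySem.Dict.getD_of_mem_items d hmem hnd 0⟩
  · rintro ⟨hv, hg⟩
    refine ⟨?_, hv⟩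
    have := pv_getD_ne_mem_items d hnd k (by rw [hg]; exact hv)
    rwa [hg] at this

-- canonical forms are equal iff lookups with default 0 agree on every key
theorem pv_canon_eq_iff (d1 d2 : PySem.Dict String Int)
    (h1 : d1.keys.Nodup) (h2 : d2.keys.Nodup) :
    pvCanon d1 = pvCanon d2 ↔ ∀ k, d1.getD k 0 = d2.getD k 0 := by
  unfold pvCanon
  constructor
  · intro heq k
    by_cases hv1 : d1.getD k 0 = 0
    · by_cases hv2 : d2.getD k 0 = 0
      · rw [hv1, hv2]
      · have hm : (k, d2.getD k 0) ∈ d2.items.filter (fun kv => kv.2 != 0) :=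
          (pv_mem_filter_iff d2 h2 k _).mpr ⟨hv2, rfl⟩
        have : (k, d2.getD k 0) ∈ d1.items.filter (fun kv => kv.2 != 0) := by
          have := (PySem.List.mem_sorted _ (fun kv => kv.1) false _).mpr hm
          rw [← heq] at this
          exact (PySem.List.mem_sorted _ _ _ _).mp this
        have := ((pv_mem_filter_iff d1 h1 k _).mp this).2
        omega
    · have hm : (k, d1.getD k 0) ∈ d1.items.filter (fun kv => kv.2 != 0) :=
        (pv_mem_filter_iff d1 h1 k _).mpr ⟨hv1, rfl⟩
      have : (k, d1.getD k 0) ∈ d2.items.filter (fun kv => kv.2 != 0) := by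
        have := (PySem.List.mem_sorted _ (fun kv => kv.1) false _).mpr hm
        rw [heq] at this
        exact (PySem.List.mem_sorted _ _ _ _).mp this
      exact ((pv_mem_filter_iff d2 h2 k _).mp this).2.symm
  · intro hpt
    set l1 := d1.items.filter (fun kv => kv.2 != 0) with hl1
    set l2 := d2.items.filter (fun kv => kv.2 != 0) with hl2
    -- the filtered item lists have Nodup key projections
    have hk1 : (l1.map Prod.fst).Nodup := by
      have hs : (l1.map Prod.fst).Sublist (d1.items.map Prod.fst) :=
        (List.filter_sublist).map Prod.fst
      exact hs.nodup h1
    have hk2 : (l2.map Prod.fst).Nodup := by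
      have hs : (l2.map Prod.fst).Sublist (d2.items.map Prod.fst) :=
        (List.filter_sublist).map Prod.fst
      exact hs.nodup h2
    -- they are permutations of each other (same members, nodup)
    have hnd1 : l1.Nodup := hk1.of_map _
    have hnd2 : l2.Nodup := hk2.of_map _
    have hperm : l2.Perm l1 := by
      rw [List.perm_ext_iff_of_nodup hnd2 hnd1]
      rintro ⟨k, v⟩
      rw [hl1, hl2, pv_mem_filter_iff d1 h1 k v, pv_mem_filter_iff d2 h2 k v, hpt k]
    -- sorted l2 is a strictly key-increasing permutation of l1, hence equals sorted l1
    have hperm2 : (PySem.List.sorted l2 (fun kv => kv.1)).Perm l1 :=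
      (PySem.List.sorted_perm _ _ _).trans hperm
    have hkn : ((PySem.List.sorted l2 (fun kv : String × Int => kv.1)).map Prod.fst).Nodup :=
      ((PySem.List.sorted_perm l2 (fun kv : String × Int => kv.1)
        false).map Prod.fst).nodup_iff.mpr hk2
    have hne : (PySem.List.sorted l2 (fun kv : String × Int => kv.1)).Pairwise
        (fun a b : String × Int => a.1 ≠ b.1) := by
      rwa [List.Nodup, List.pairwise_map] at hkn
    have hpw : (PySem.List.sorted l2 (fun kv : String × Int => kv.1)).Pairwise
        (fun a b : String × Int => a.1 < b.1) :=
      ((PySem.List.sorted_pairwise l2 (fun kv : String × Int => kv.1)).and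
        hne).imp (fun h => lt_of_le_of_ne h.1 h.2)
    exact (PySem.List.sorted_eq_of_perm_of_pairwise_lt _ _ _ hperm2 hpw)

-- A's two scans pass iff lookups with default 0 agree on every key
theorem pv_scans_iff (d1 d2 : PySem.Dict String Int) :
    (((d1.keys.all fun i => d1.getD i 0 == d2.getD i 0) &&
      (d2.keys.all fun i => d2.getD i 0 == d1.getD i 0)) = true)
    ↔ ∀ k, d1.getD k 0 = d2.getD k 0 := by
  simp only [Bool.and_eq_true, List.all_eq_true, beq_iff_eq]
  constructor
  · rintro ⟨ha, hb⟩ k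
    by_cases hc1 : d1.contains k = true
    · exact ha k ((PySem.Dict.contains_iff_mem_keys _ _).mp hc1)
    · by_cases hc2 : d2.contains k = true
      · exact (hb k ((PySem.Dict.contains_iff_mem_keys _ _).mp hc2)).symm
      · rw [PySem.Dict.getD_of_not_contains _ _ (by simpa using hc1),
            PySem.Dict.getD_of_not_contains _ _ (by simpa using hc2)]
  · intro h
    exact ⟨fun k _ => h k, fun k _ => (h k).symm⟩

-- ===== VERDICT (by name: the statement is the Claim_ definition above) =====
theorem checkOK_spec : Claim_equal_checkOK := by
  intro m1 m2 _
  unfold Spec_checkOK checkOK checkOK_alt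
  rw [Bool.eq_iff_iff, beq_iff_eq]
  rw [pv_scans_iff]
  exact (pv_canon_eq_iff _ _ (PySem.Dict.nodup_keys_ofList _) (PySem.Dict.nodup_keys_ofList _)).symm
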